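-- pv_equiv track=rewrite | github.com/hyamato3/python_test-projects | test_read/read_text.py | SearchDetail
-- ===== SOURCE A (Python) =====
-- def SearchDetail(dictDetail):
--     #読み込んだ辞書からネームだけを選び出して辞書に突っ込む
--     num1 = len(dictDetail)
--     numD1 = 1
--
--     numName = 1
--     numRoughSymbol =1
--     numDetailNumber = 1
--     numTech1 = 1
--     numTech2 = 1
--     numComment = 1
--
--     dictName = {0: 'dictName'}
--     dictRoughSymbol = {0: 'dictRoughSymbol'}
--     dictDetailNumber = {0: 'dictDetailNumber'}
--     dictTech1 = {0: 'dictTech1'}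
--     dictTech2 = {0: 'dictTech2'}
--     dictComment = {0: 'dictComment'}
--
--     for i in range(num1):
--         if dictDetail[i].startswith('name_') == True:
--             dictName[numName] = dictDetail[i]
--             numName += 1
--
--         elif dictDetail[i].startswith('rough_') == True:
--             dictRoughSymbol[numRoughSymbol] = dictDetail[i]
--             numRoughSymbol += 1
--
--         elif dictDetail[i].startswith('detail_') == True:
--             dictDetailNumber[numDetailNumber] = dictDetail[i]
--             numDetailNumber += 1
--
--         elif dictDetail[i].startswith('tech1_') == True:
--             dictTech1[numTech1] = dictDetail[i]
--             numTech1 += 1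
--
--         elif dictDetail[i].startswith('tech2_') == True:
--             dictTech2[numTech2] = dictDetail[i]
--             numTech2 += 1
--
--         elif dictDetail[i].startswith('comment_') == True:
--             dictComment[numComment] = dictDetail[i]
--             numComment += 1
--         numD1 += 1
--
--     return dictName, dictRoughSymbol, dictDetailNumber, dictTech1, dictTech2, dictComment
-- ===== SOURCE B (Python) =====
-- def SearchDetail(dictDetail):
--     # Six independent filtering passes (one per prefix) instead of one ordered
--     # if/elif scan; the prefixes are mutually exclusive, so the result is identical.
--     vals = [dictDetail[i] for i in range(len(dictDetail))]
--
--     def cat(title, prefix):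
--         d = {0: title}
--         for j, v in enumerate((v for v in vals if v.startswith(prefix)), 1):
--             d[j] = v
--         return d
--
--     return (cat('dictName', 'name_'),
--             cat('dictRoughSymbol', 'rough_'),
--             cat('dictDetailNumber', 'detail_'),
--             cat('dictTech1', 'tech1_'),
--             cat('dictTech2', 'tech2_'),
--             cat('dictComment', 'comment_'))
-- ===== Notes on version B (the rewrite author's own statement) =====
-- stated objective: alternative
-- what changed: A's single loop with an ordered if/elif chain and six counters is replaced by six independent per-prefix filtering passes (filter + enumerate from 1), valid because the six prefixes are mutually exclusive.
import Mathlib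
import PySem

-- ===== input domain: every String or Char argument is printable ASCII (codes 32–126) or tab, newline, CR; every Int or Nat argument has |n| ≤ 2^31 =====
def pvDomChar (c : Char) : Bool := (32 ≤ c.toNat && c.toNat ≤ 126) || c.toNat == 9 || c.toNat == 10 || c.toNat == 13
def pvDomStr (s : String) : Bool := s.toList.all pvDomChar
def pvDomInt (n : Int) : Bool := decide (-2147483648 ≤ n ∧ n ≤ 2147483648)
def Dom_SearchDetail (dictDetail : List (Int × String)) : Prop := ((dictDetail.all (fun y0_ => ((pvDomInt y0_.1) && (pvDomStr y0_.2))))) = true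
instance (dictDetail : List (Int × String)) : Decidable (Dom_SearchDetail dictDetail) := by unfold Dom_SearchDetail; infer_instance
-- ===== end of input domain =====

-- B replaces A's single ordered if/elif pass by six independent per-prefix filtering
-- passes (the prefixes are mutually exclusive), objective: alternative decomposition.

-- ===== PORT A =====
-- the loop state: six (dict, next-key counter) pairs, in A's order
-- (name, rough, detail, tech1, tech2, comment); A's local numD1 is dead (never read) and omitted
def pvStepA (st : (PySem.Dict Int String × Int) × (PySem.Dict Int String × Int) × (PySem.Dict Int String × Int) ×
                  (PySem.Dict Int String × Int) × (PySem.Dict Int String × Int) × (PySem.Dict Int String × Int))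
    (s : String) :
    (PySem.Dict Int String × Int) × (PySem.Dict Int String × Int) × (PySem.Dict Int String × Int) ×
    (PySem.Dict Int String × Int) × (PySem.Dict Int String × Int) × (PySem.Dict Int String × Int) :=
  match st with
  | ((dN, nN), (dR, nR), (dD, nD), (dT1, nT1), (dT2, nT2), (dC, nC)) =>
    if PySem.Str.startswith s "name_" then
      ((dN.insert nN s, nN + 1), (dR, nR), (dD, nD), (dT1, nT1), (dT2, nT2), (dC, nC))
    else if PySem.Str.startswith s "rough_" then
      ((dN, nN), (dR.insert nR s, nR + 1), (dD, nD), (dT1, nT1), (dT2, nT2), (dC, nC))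
    else if PySem.Str.startswith s "detail_" then
      ((dN, nN), (dR, nR), (dD.insert nD s, nD + 1), (dT1, nT1), (dT2, nT2), (dC, nC))
    else if PySem.Str.startswith s "tech1_" then
      ((dN, nN), (dR, nR), (dD, nD), (dT1.insert nT1 s, nT1 + 1), (dT2, nT2), (dC, nC))
    else if PySem.Str.startswith s "tech2_" then
      ((dN, nN), (dR, nR), (dD, nD), (dT1, nT1), (dT2.insert nT2 s, nT2 + 1), (dC, nC))
    else if PySem.Str.startswith s "comment_" then
      ((dN, nN), (dR, nR), (dD, nD), (dT1, nT1), (dT2, nT2), (dC.insert nC s, nC + 1))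
    else
      ((dN, nN), (dR, nR), (dD, nD), (dT1, nT1), (dT2, nT2), (dC, nC))

def SearchDetail (dictDetail : List (Int × String)) :
    (List (Int × String)) × (List (Int × String)) × (List (Int × String)) × (List (Int × String)) × (List (Int × String)) × (List (Int × String)) :=
  let d := PySem.Dict.mk dictDetail
  let num1 : Int := (dictDetail.length : Int)
  let r :=
    (PySem.List.pyRange 0 num1 1).foldl
      -- dictDetail[i]: Pre_ guarantees the key is present (Python raises KeyError otherwise)
      (fun st i => pvStepA st ((d.get? i).getD ""))
      ((PySem.Dict.mk [((0 : Int), "dictName")], (1 : Int)),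
       (PySem.Dict.mk [((0 : Int), "dictRoughSymbol")], (1 : Int)),
       (PySem.Dict.mk [((0 : Int), "dictDetailNumber")], (1 : Int)),
       (PySem.Dict.mk [((0 : Int), "dictTech1")], (1 : Int)),
       (PySem.Dict.mk [((0 : Int), "dictTech2")], (1 : Int)),
       (PySem.Dict.mk [((0 : Int), "dictComment")], (1 : Int)))
  (r.1.1.items, r.2.1.1.items, r.2.2.1.1.items, r.2.2.2.1.1.items, r.2.2.2.2.1.1.items, r.2.2.2.2.2.1.items)

-- ===== PORT B =====
-- cat(title, prefix): {0: title} then d[j] = v for j = 1, 2, … — always-fresh increasing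
-- keys, so the dict's item list is the cons of the enumerated filtered values
def pvCat (title : String) (pref : String) (vals : List String) : List (Int × String) :=
  ((0 : Int), title) :: PySem.List.enumerate (vals.filter (fun v => PySem.Str.startswith v pref)) 1

def SearchDetail_alt (dictDetail : List (Int × String)) :
    (List (Int × String)) × (List (Int × String)) × (List (Int × String)) × (List (Int × String)) × (List (Int × String)) × (List (Int × String)) :=
  let d := PySem.Dict.mk dictDetail
  -- vals = [dictDetail[i] for i in range(len(dictDetail))]; Pre_ guarantees each key is present
  let vals := (PySem.List.pyRange 0 (dictDetail.length : Int) 1).map (fun i => (d.get? i).getD "")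
  (pvCat "dictName" "name_" vals,
   pvCat "dictRoughSymbol" "rough_" vals,
   pvCat "dictDetailNumber" "detail_" vals,
   pvCat "dictTech1" "tech1_" vals,
   pvCat "dictTech2" "tech2_" vals,
   pvCat "dictComment" "comment_" vals)

-- ===== PRECONDITION & SPEC =====
-- A looks up dictDetail[i] for i in range(len(dictDetail)): on a dict that is missing
-- one of the keys 0..len-1 both Pythons raise KeyError, so exactly those are excluded.
def Pre_SearchDetail (dictDetail : List (Int × String)) : Prop :=
  ∀ i : Nat, i < dictDetail.length → (i : Int) ∈ dictDetail.map Prod.fst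
instance (dictDetail : List (Int × String)) : Decidable (Pre_SearchDetail dictDetail) := by unfold Pre_SearchDetail; infer_instance

def pvWitness_SearchDetail : (List (Int × String)) := [(0, "name_a"), (1, "misc")]

def Spec_SearchDetail (dictDetail : List (Int × String)) (out : (List (Int × String)) × (List (Int × String)) × (List (Int × String)) × (List (Int × String)) × (List (Int × String)) × (List (Int × String))) : Prop := out = SearchDetail_alt dictDetail
instance (dictDetail : List (Int × String)) (out : (List (Int × String)) × (List (Int × String)) × (List (Int × String)) × (List (Int × String)) × (List (Int × String)) × (List (Int × String))) : Decidable (Spec_SearchDetail dictDetail out) := by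
  unfold Spec_SearchDetail
  have h2 : DecidableEq (List (Int × String) × List (Int × String)) := instDecidableEqProd
  have h3 : DecidableEq (List (Int × String) × List (Int × String) × List (Int × String)) := instDecidableEqProd
  have h4 : DecidableEq (List (Int × String) × List (Int × String) × List (Int × String) × List (Int × String)) := instDecidableEqProd
  have h5 : DecidableEq (List (Int × String) × List (Int × String) × List (Int × String) × List (Int × String) × List (Int × String)) := instDecidableEqProd
  have h6 : DecidableEq (List (Int × String) × List (Int × String) × List (Int × String) × List (Int × String) × List (Int × String) × List (Int × String)) := instDecidableEqProd
  exact h6 out _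

-- ===== CLAIM (what is proved, stated in full; the proofs are below) =====
def Claim_equal_SearchDetail : Prop := ∀ (dictDetail : List (Int × String)), Dom_SearchDetail dictDetail → Pre_SearchDetail dictDetail → Spec_SearchDetail dictDetail (SearchDetail dictDetail)

-- ===== LEMMAS AND PROOFS =====

-- one category's step: insert iff the value starts with this category's prefix
def pvCatStep (pref : String) (p : PySem.Dict Int String × Int) (s : String) :
    PySem.Dict Int String × Int :=
  if PySem.Str.startswith s pref then (p.1.insert p.2 s, p.2 + 1) else p

-- a string starting with prefix p starts with no prefix q incomparable with p
lemma pvExcl {s p q : List Char} (hne : ¬ (p <+: q ∨ q <+: p))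
    (h : PySem.Chars.startswith s p = true) : PySem.Chars.startswith s q = false := by
  rw [PySem.Chars.startswith_iff] at h
  rw [← Bool.not_eq_true, PySem.Chars.startswith_iff]
  intro hq
  exact hne (List.prefix_or_prefix_of_prefix h hq)

-- A's combined step acts on each component exactly as that component's own pvCatStep
lemma pvStepA_eq (stN stR stD stT1 stT2 stC : PySem.Dict Int String × Int) (s : String) :
    pvStepA (stN, stR, stD, stT1, stT2, stC) s
      = (pvCatStep "name_" stN s, pvCatStep "rough_" stR s, pvCatStep "detail_" stD s,
         pvCatStep "tech1_" stT1 s, pvCatStep "tech2_" stT2 s, pvCatStep "comment_" stC s) := by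
  by_cases h1 : PySem.Chars.startswith s.toList ['n', 'a', 'm', 'e', '_']
  · simp [pvStepA, pvCatStep, h1, pvExcl (by decide) h1 (q := ['r', 'o', 'u', 'g', 'h', '_']),
      pvExcl (by decide) h1 (q := ['d', 'e', 't', 'a', 'i', 'l', '_']),
      pvExcl (by decide) h1 (q := ['t', 'e', 'c', 'h', '1', '_']),
      pvExcl (by decide) h1 (q := ['t', 'e', 'c', 'h', '2', '_']),
      pvExcl (by decide) h1 (q := ['c', 'o', 'm', 'm', 'e', 'n', 't', '_'])]
  by_cases h2 : PySem.Chars.startswith s.toList ['r', 'o', 'u', 'g', 'h', '_']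
  · simp [pvStepA, pvCatStep, h1, h2, pvExcl (by decide) h2 (q := ['d', 'e', 't', 'a', 'i', 'l', '_']),
      pvExcl (by decide) h2 (q := ['t', 'e', 'c', 'h', '1', '_']),
      pvExcl (by decide) h2 (q := ['t', 'e', 'c', 'h', '2', '_']),
      pvExcl (by decide) h2 (q := ['c', 'o', 'm', 'm', 'e', 'n', 't', '_'])]
  by_cases h3 : PySem.Chars.startswith s.toList ['d', 'e', 't', 'a', 'i', 'l', '_']
  · simp [pvStepA, pvCatStep, h1, h2, h3, pvExcl (by decide) h3 (q := ['t', 'e', 'c', 'h', '1', '_']),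
      pvExcl (by decide) h3 (q := ['t', 'e', 'c', 'h', '2', '_']),
      pvExcl (by decide) h3 (q := ['c', 'o', 'm', 'm', 'e', 'n', 't', '_'])]
  by_cases h4 : PySem.Chars.startswith s.toList ['t', 'e', 'c', 'h', '1', '_']
  · simp [pvStepA, pvCatStep, h1, h2, h3, h4,
      pvExcl (by decide) h4 (q := ['t', 'e', 'c', 'h', '2', '_']),
      pvExcl (by decide) h4 (q := ['c', 'o', 'm', 'm', 'e', 'n', 't', '_'])]
  by_cases h5 : PySem.Chars.startswith s.toList ['t', 'e', 'c', 'h', '2', '_']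
  · simp [pvStepA, pvCatStep, h1, h2, h3, h4, h5,
      pvExcl (by decide) h5 (q := ['c', 'o', 'm', 'm', 'e', 'n', 't', '_'])]
  by_cases h6 : PySem.Chars.startswith s.toList ['c', 'o', 'm', 'm', 'e', 'n', 't', '_']
  · simp [pvStepA, pvCatStep, h1, h2, h3, h4, h5, h6]
  · simp [pvStepA, pvCatStep, h1, h2, h3, h4, h5, h6]

-- A's loop splits into six independent per-category folds over the looked-up values
lemma pvLoop_eq {α : Type} (l : List α) (g : α → String) :
    ∀ stN stR stD stT1 stT2 stC,
      l.foldl (fun st i => pvStepA st (g i)) (stN, stR, stD, stT1, stT2, stC)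
        = (l.foldl (fun p i => pvCatStep "name_" p (g i)) stN,
           l.foldl (fun p i => pvCatStep "rough_" p (g i)) stR,
           l.foldl (fun p i => pvCatStep "detail_" p (g i)) stD,
           l.foldl (fun p i => pvCatStep "tech1_" p (g i)) stT1,
           l.foldl (fun p i => pvCatStep "tech2_" p (g i)) stT2,
           l.foldl (fun p i => pvCatStep "comment_" p (g i)) stC) := by
  induction l with
  | nil => intro _ _ _ _ _ _; rfl
  | cons a l ih =>
    intro stN stR stD stT1 stT2 stC
    simp only [List.foldl, pvStepA_eq]
    exact ih _ _ _ _ _ _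

-- a per-category fold appends the enumerated filtered values to its dict's items
lemma pvCatFold_items (pref : String) {α : Type} (l : List α) (g : α → String) :
    ∀ (d : PySem.Dict Int String) (n : Int), (∀ k ∈ d.keys, k < n) →
      (l.foldl (fun p i => pvCatStep pref p (g i)) (d, n)).1.items
        = d.items ++ PySem.List.enumerate ((l.map g).filter (fun v => PySem.Str.startswith v pref)) n := by
  induction l with
  | nil => intro d n _; simp
  | cons a l ih =>
    intro d n hk
    by_cases h : PySem.Chars.startswith (g a).toList pref.toList
    · have hc : d.contains n = false := by
        rw [PySem.Dict.contains_eq_decide_mem_keys]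
        simp only [decide_eq_false_iff_not]
        intro hmem
        exact absurd (hk n hmem) (by omega)
      have hinv : ∀ k ∈ (d.insert n (g a)).keys, k < n + 1 := by
        intro k hk'
        rcases (PySem.Dict.mem_keys_insert d n k (g a)).mp hk' with h' | h'
        · omega
        · have := hk k h'; omega
      have hstep : pvCatStep pref (d, n) (g a) = (d.insert n (g a), n + 1) := by
        simp [pvCatStep, h]
      simp only [List.foldl, hstep]
      rw [ih _ _ hinv, PySem.Dict.items_insert_of_not_contains d _ hc]
      simp [h]
    · have hstep : pvCatStep pref (d, n) (g a) = (d, n) := by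
        simp [pvCatStep, h]
      simp only [List.foldl, hstep]
      rw [ih d n hk]
      simp [h]

-- ===== VERDICT (by name: the statement is the Claim_ definition above) =====
theorem SearchDetail_spec : Claim_equal_SearchDetail := by
  intro dictDetail _dom _pre
  unfold Spec_SearchDetail SearchDetail SearchDetail_alt pvCat
  simp only
  rw [pvLoop_eq]
  simp only
  refine Prod.ext ?_ (Prod.ext ?_ (Prod.ext ?_ (Prod.ext ?_ (Prod.ext ?_ ?_)))) <;>
    simp only <;>
    rw [pvCatFold_items] <;>
    first
      | rfl
      | (intro k hk; simp only [PySem.Dict.keys_mk, List.map_cons, List.map_nil,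
          List.mem_singleton] at hk; omega)
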